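-- pv_equiv track=rewrite | github.com/ark2016/VK-Technopark-project-2024 | data_mining/tests/functions/file_1021_1040.py | find_difference_elements_in_list
-- ===== SOURCE A (Python) =====
-- def find_difference_elements_in_list(lst):
--     result = []
--     for i in range(len(lst)):
--         for j in range(i+1, len(lst)):
--             if lst[i] - lst[j] == 0:
--                 result.append(lst[i])
--     if not result:
--         return None
--     return result
-- ===== SOURCE B (Python) =====
-- def find_difference_elements_in_list(lst):
--     remaining = {}
--     for v in lst:
--         remaining[v] = remaining.get(v, 0) + 1
--     result = []
--     for v in lst:
--         remaining[v] -= 1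
--         result += [v] * remaining[v]
--     return result if result else None
-- ===== Notes on version B (the rewrite author's own statement) =====
-- stated objective: alternative
-- what changed: Replaces the nested index loops (comparing every pair) with a frequency dictionary built in one pass, then a single pass that decrements each element's remaining count and emits it that many times.
import Mathlib
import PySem

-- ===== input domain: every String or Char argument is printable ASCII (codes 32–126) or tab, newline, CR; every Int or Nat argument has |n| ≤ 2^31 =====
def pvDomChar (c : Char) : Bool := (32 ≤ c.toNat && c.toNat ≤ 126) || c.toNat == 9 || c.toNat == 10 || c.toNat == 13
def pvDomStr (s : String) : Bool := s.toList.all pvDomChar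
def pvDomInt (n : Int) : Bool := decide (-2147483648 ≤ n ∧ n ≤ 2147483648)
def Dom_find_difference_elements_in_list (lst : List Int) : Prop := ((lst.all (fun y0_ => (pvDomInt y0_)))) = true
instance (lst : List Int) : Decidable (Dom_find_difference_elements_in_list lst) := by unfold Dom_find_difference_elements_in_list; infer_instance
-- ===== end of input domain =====

-- B replaces A's nested index loops with a frequency dictionary and a single emitting pass (alternative algorithm; output size dominates on duplicate-heavy inputs).

-- ===== PORT A =====
def find_difference_elements_in_list (lst : List Int) : Option (List Int) :=
  let result := (PySem.List.pyRange 0 (lst.length : Int) 1).foldl (fun res i =>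
    (PySem.List.pyRange (i + 1) (lst.length : Int) 1).foldl (fun res j =>
      if PySem.List.pyGetD lst i 0 - PySem.List.pyGetD lst j 0 = 0
      then res ++ [PySem.List.pyGetD lst i 0] else res) res) []
  if result = [] then none else some result

-- ===== PORT B =====
def find_difference_elements_in_list_alt (lst : List Int) : Option (List Int) :=
  let remaining : PySem.Dict Int Int :=
    lst.foldl (fun d v => d.insert v (d.getD v 0 + 1)) PySem.Dict.empty
  let st := lst.foldl (fun (st : PySem.Dict Int Int × List Int) v =>
      let d := st.1.insert v (st.1.getD v 0 - 1)
      (d, st.2 ++ List.replicate (d.getD v 0).toNat v)) (remaining, [])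
  if st.2 = [] then none else some st.2

-- ===== PRECONDITION & SPEC =====
def Spec_find_difference_elements_in_list (lst : List Int) (out : Option (List Int)) : Prop := out = find_difference_elements_in_list_alt lst
instance (lst : List Int) (out : Option (List Int)) : Decidable (Spec_find_difference_elements_in_list lst out) := by unfold Spec_find_difference_elements_in_list; infer_instance

-- ===== CLAIM (what is proved, stated in full; the proofs are below) =====
def Claim_equal_find_difference_elements_in_list : Prop := ∀ (lst : List Int), Dom_find_difference_elements_in_list lst → Spec_find_difference_elements_in_list lst (find_difference_elements_in_list lst)

-- ===== LEMMAS AND PROOFS =====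

/-- The common value both loops compute: each element repeated once per later equal occurrence. -/
def pvDup : List Int → List Int
  | [] => []
  | x :: t => List.replicate (t.count x) x ++ pvDup t

/-- A map-to-constant over a filter is `replicate countP`. -/
lemma pv_map_const_filter (c : Int) (p : Int → Bool) (l : List Int) :
    (l.filter p).map (fun _ => c) = List.replicate (l.countP p) c := by
  induction l with
  | nil => simp
  | cons y t ih =>
    by_cases h : p y <;>
      simp [h, ih, List.replicate_succ]

/-- A's loop test `lst[i] - lst[j] == 0` counts occurrences of `lst[i]`. -/
lemma pv_countP_sub (c : Int) (l : List Int) :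
    l.countP (fun x => decide (c - x = 0)) = l.count c := by
  rw [List.count]
  apply List.countP_congr
  intro x _
  have hx : (c - x = 0) ↔ (x = c) := by omega
  simp [hx]

/-- A's inner loop over `j` appends `lst[i]` once per equal later element. -/
lemma pvA_inner (lst : List Int) (i : Int) (hi : 0 ≤ i) (res : List Int) :
    (PySem.List.pyRange (i + 1) (lst.length : Int) 1).foldl (fun res j =>
      if PySem.List.pyGetD lst i 0 - PySem.List.pyGetD lst j 0 = 0
      then res ++ [PySem.List.pyGetD lst i 0] else res) res
    = res ++ List.replicate ((lst.drop (i + 1).toNat).count (PySem.List.pyGetD lst i 0))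
        (PySem.List.pyGetD lst i 0) := by
  rw [PySem.List.foldl_pyRange_pyGetD' lst 0
    (fun acc x => if PySem.List.pyGetD lst i 0 - x = 0 then acc ++ [PySem.List.pyGetD lst i 0] else acc)
    res (by omega : (0:Int) ≤ i + 1)]
  rw [PySem.List.foldl_append_ite (fun x => PySem.List.pyGetD lst i 0 - x = 0)
    (fun _ => PySem.List.pyGetD lst i 0)]
  rw [pv_map_const_filter, pv_countP_sub]

/-- A's outer loop, generalized over a split of the list. -/
lemma pvA_outer (pref suf res : List Int) :
    (PySem.List.pyRange (pref.length : Int) ((pref ++ suf).length : Int) 1).foldl (fun res i =>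
      (PySem.List.pyRange (i + 1) ((pref ++ suf).length : Int) 1).foldl (fun res j =>
        if PySem.List.pyGetD (pref ++ suf) i 0 - PySem.List.pyGetD (pref ++ suf) j 0 = 0
        then res ++ [PySem.List.pyGetD (pref ++ suf) i 0] else res) res) res
    = res ++ pvDup suf := by
  induction suf generalizing pref res with
  | nil => simp [PySem.List.pyRange_one_eq_nil le_rfl, pvDup]
  | cons x t ih =>
    have hlen : ((pref ++ x :: t).length : Int) = (pref.length : Int) + 1 + (t.length : Int) := by
      simp; ring
    rw [PySem.List.pyRange_one_cons (by rw [hlen]; have := Int.natCast_nonneg t.length; omega)]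
    rw [List.foldl_cons]
    rw [pvA_inner _ _ (Int.natCast_nonneg pref.length)]
    have hget : PySem.List.pyGetD (pref ++ x :: t) ((pref.length : Nat) : Int) 0 = x := by
      rw [PySem.List.pyGetD_natCast]
      unfold List.getD
      rw [List.getElem?_append_right le_rfl]
      simp
    have hdrop : (pref ++ x :: t).drop (((pref.length : Nat) : Int) + 1).toNat = t := by
      have h1 : (((pref.length : Nat) : Int) + 1).toNat = pref.length + 1 := by omega
      rw [h1]
      rw [show pref.length + 1 = (pref ++ [x]).length by simp,
          show pref ++ x :: t = (pref ++ [x]) ++ t by simp]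
      exact List.drop_left
    rw [hget, hdrop]
    have happ : (pref ++ [x]) ++ t = pref ++ x :: t := by simp
    have hcast : (((pref ++ [x]).length : Nat) : Int) = ((pref.length : Nat) : Int) + 1 := by simp
    have ih' := ih (pref ++ [x]) (res ++ List.replicate (t.count x) x)
    rw [happ, hcast] at ih'
    rw [ih']
    simp [pvDup]

/-- B's emitting loop, under the invariant that the dict holds suffix counts. -/
lemma pvB_loop (suf : List Int) (d : PySem.Dict Int Int) (acc : List Int)
    (hd : ∀ w : Int, d.getD w 0 = (suf.count w : Int)) :
    (suf.foldl (fun (st : PySem.Dict Int Int × List Int) v =>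
      let d := st.1.insert v (st.1.getD v 0 - 1)
      (d, st.2 ++ List.replicate (d.getD v 0).toNat v)) (d, acc)).2
    = acc ++ pvDup suf := by
  induction suf generalizing d acc with
  | nil => simp [pvDup]
  | cons v t ih =>
    have hself : (d.insert v (d.getD v 0 - 1)).getD v 0 = (t.count v : Int) := by
      rw [PySem.Dict.getD_insert_self, hd v]
      simp
    have hinv : ∀ w : Int, (d.insert v (d.getD v 0 - 1)).getD w 0 = (t.count w : Int) := by
      intro w
      by_cases hw : w = v
      · subst hw; exact hself
      · rw [PySem.Dict.getD_insert, if_neg hw, hd w]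
        simp [List.count_cons]
        exact fun h => hw h.symm
    rw [List.foldl_cons]
    show (t.foldl _ (d.insert v (d.getD v 0 - 1),
        acc ++ List.replicate ((d.insert v (d.getD v 0 - 1)).getD v 0).toNat v)).2 = _
    rw [ih _ _ hinv, hself]
    simp [pvDup]

-- ===== VERDICT (by name: the statement is the Claim_ definition above) =====
theorem find_difference_elements_in_list_spec : Claim_equal_find_difference_elements_in_list := by
  intro lst _
  unfold Spec_find_difference_elements_in_list find_difference_elements_in_list find_difference_elements_in_list_alt
  have hA := pvA_outer [] lst []
  simp only [List.nil_append, List.length_nil, Nat.cast_zero] at hA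
  have hB := pvB_loop lst (lst.foldl (fun d v => d.insert v (d.getD v 0 + 1)) PySem.Dict.empty) []
    (fun w => by simpa using PySem.Dict.getD_foldl_insert_add_one lst PySem.Dict.empty w)
  simp only [List.nil_append] at hB
  dsimp only
  rw [hA, hB]
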